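-- pv_equiv track=rewrite | github.com/Berkeley-Speech-Group/DysfluentWFST | utils/fst.py | extract_phoneme_states
-- ===== SOURCE A (Python) =====
-- def extract_phoneme_states(transition_list):
--     merged_list = []
--     current_merge = None
--
--     for item in transition_list:
--         if "<trans>" in item:
--             if current_merge is None:
--                 current_merge = item
--             else:
--                 current_merge = current_merge.split("<trans>")[0] + "<trans>" + item.split("<trans>")[-1]
--         else:
--             if current_merge is not None:
--                 merged_list.append(current_merge)
--                 current_merge = None
--             merged_list.append(item)
--
--     # Handle case where the last item was a merge
--     if current_merge is not None:
--         merged_list.append(current_merge)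
--
--     return merged_list
-- ===== SOURCE B (Python) =====
-- def extract_phoneme_states(transition_list):
--     n = len(transition_list)
--     T = "<trans>"
--     # backward pass: for each position, the last item of its run of consecutive T-items
--     last_of_run = [""] * n
--     for i in range(n - 1, -1, -1):
--         if i + 1 < n and T in transition_list[i] and T in transition_list[i + 1]:
--             last_of_run[i] = last_of_run[i + 1]
--         else:
--             last_of_run[i] = transition_list[i]
--     out = []
--     for i, item in enumerate(transition_list):
--         if T not in item:
--             out.append(item)
--         elif i == 0 or T not in transition_list[i - 1]:      # start of a T-run
--             if i + 1 == n or T not in transition_list[i + 1]: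
--                 out.append(item)                             # singleton run: verbatim
--             else:
--                 out.append(item.split(T)[0] + T + last_of_run[i + 1].split(T)[-1])
--     return out
-- ===== Notes on version B (the rewrite author's own statement) =====
-- stated objective: alternative
-- what changed: B drops A's stateful current_merge accumulator entirely: a backward dynamic-programming pass fills a table last_of_run (the last item of each run of consecutive '<trans>' items), and a second index-local pass emits each non-trans item, each singleton trans run verbatim, and at each trans-run start the closed-form merge first.split[0] + '<trans>' + last_of_run[i+1].split[-1], decided purely from neighbour tests.
import Mathlib
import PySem

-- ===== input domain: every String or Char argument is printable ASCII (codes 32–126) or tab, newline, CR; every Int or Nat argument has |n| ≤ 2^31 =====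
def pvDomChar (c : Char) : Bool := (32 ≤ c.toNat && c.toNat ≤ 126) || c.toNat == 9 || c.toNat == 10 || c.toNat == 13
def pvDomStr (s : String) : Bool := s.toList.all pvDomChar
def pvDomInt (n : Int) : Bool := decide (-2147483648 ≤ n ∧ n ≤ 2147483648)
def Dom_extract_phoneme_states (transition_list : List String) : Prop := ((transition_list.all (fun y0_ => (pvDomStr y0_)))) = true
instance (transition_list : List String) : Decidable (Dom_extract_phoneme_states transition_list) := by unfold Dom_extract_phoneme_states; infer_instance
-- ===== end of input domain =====

-- B replaces A's stateful current_merge accumulator with a backward DP table (last item of each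
-- run of consecutive "<trans>" items) plus an index-local emission pass; alternative, same cost.

-- ===== PORT A =====
def pvSplitA (s : String) : List String := (PySem.Str.split? s "<trans>").getD []

-- current_merge.split("<trans>")[0] + "<trans>" + item.split("<trans>")[-1]
-- (split? with a nonempty separator always returns a nonempty list, so the defaults are never used)
def pvMergeA (c item : String) : String :=
  PySem.List.pyGetD (pvSplitA c) 0 "" ++ "<trans>" ++ PySem.List.pyGetD (pvSplitA item) (-1) ""

def pvStepA (st : List String × Option String) (item : String) : List String × Option String :=
  if PySem.Str.isIn "<trans>" item then
    match st.2 with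
    | none => (st.1, some item)
    | some c => (st.1, some (pvMergeA c item))
  else
    match st.2 with
    | none => (st.1 ++ [item], none)
    | some c => (st.1 ++ [c] ++ [item], none)

def extract_phoneme_states (transition_list : List String) : List String :=
  match transition_list.foldl pvStepA ([], none) with
  | (m, some c) => m ++ [c]
  | (m, none) => m

-- ===== PORT B =====
def pvIsTrans (s : String) : Bool := PySem.Str.isIn "<trans>" s

-- item.split("<trans>")[0]  /  item.split("<trans>")[-1]
def pvHeadPiece (s : String) : String := PySem.List.pyGetD ((PySem.Str.split? s "<trans>").getD []) 0 ""
def pvLastPiece (s : String) : String := PySem.List.pyGetD ((PySem.Str.split? s "<trans>").getD []) (-1) ""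

-- the backward pass: last_of_run[i] = last_of_run[i+1] if trans[i] and trans[i+1], else item[i]
def pvLastRun : List String → List String
  | [] => []
  | [x] => [x]
  | x :: y :: xs =>
    let r := pvLastRun (y :: xs)
    (if pvIsTrans x && pvIsTrans y then r.headD x else x) :: r

-- the emission pass over index i, carrying prev = trans[i-1] (False at i = 0); lrs is the
-- suffix of last_of_run aligned with the item suffix, so last_of_run[i+1] = lrs.tail.headD ""
def pvEmit : Bool → List String → List String → List String
  | _, [], _ => []
  | prev, [x], _ =>
    if pvIsTrans x = false then [x]
    else if prev then [] else [x]
  | prev, x :: y :: xs, lrs =>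
    (if pvIsTrans x = false then [x]
     else if prev then []
     else if pvIsTrans y = false then [x]
     else [pvHeadPiece x ++ "<trans>" ++ pvLastPiece (lrs.tail.headD "")])
    ++ pvEmit (pvIsTrans x) (y :: xs) lrs.tail

def extract_phoneme_states_alt (transition_list : List String) : List String :=
  pvEmit false transition_list (pvLastRun transition_list)

-- ===== PRECONDITION & SPEC =====
def Spec_extract_phoneme_states (transition_list : List String) (out : List String) : Prop := out = extract_phoneme_states_alt transition_list
instance (transition_list : List String) (out : List String) : Decidable (Spec_extract_phoneme_states transition_list out) := by unfold Spec_extract_phoneme_states; infer_instance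

-- ===== CLAIM (what is proved, stated in full; the proofs are below) =====
def Claim_equal_extract_phoneme_states : Prop := ∀ (transition_list : List String), Dom_extract_phoneme_states transition_list → Spec_extract_phoneme_states transition_list (extract_phoneme_states transition_list)

-- ===== LEMMAS AND PROOFS =====

-- proof-only intermediate: the run recursion both programs are proved equal to
def pvMergeRun : List String → String
  | [] => ""
  | [x] => x
  | x :: y :: r => pvHeadPiece x ++ "<trans>" ++ pvLastPiece ((y :: r).getLastD "")

def pvRunRec : List String → List String
  | [] => []
  | x :: xs =>
    if pvIsTrans x then
      pvMergeRun (x :: xs.takeWhile pvIsTrans) ::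
        pvRunRec (xs.dropWhile pvIsTrans)
    else
      (x :: xs.takeWhile (fun s => !pvIsTrans s)) ++
        pvRunRec (xs.dropWhile (fun s => !pvIsTrans s))
termination_by l => l.length
decreasing_by
  · exact Nat.lt_succ_of_le (List.length_dropWhile_le _ _)
  · exact Nat.lt_succ_of_le (List.length_dropWhile_le _ _)

def pvT : List Char := "<trans>".toList

def pvModHead (pre : List Char) : List (List Char) → List (List Char)
  | [] => [pre]
  | h :: t => (pre ++ h) :: t

theorem pvGO : ∀ (n : Nat) (v : List Char), v.length ≤ n → ∀ (f : Nat) (cur : List Char) (acc : List (List Char)),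
    v.length < f →
    PySem.Chars.splitOn.go pvT f v cur acc
      = acc.reverse ++ pvModHead cur.reverse (PySem.Chars.splitOn v pvT) := by
  intro n
  induction n with
  | zero =>
    intro v hv f cur acc hf
    have hv0 : v = [] := List.eq_nil_of_length_eq_zero (Nat.le_zero.mp hv)
    subst hv0
    match f, hf with
    | f + 1, _ =>
      simp [PySem.Chars.splitOn.go, PySem.Chars.splitOn, pvModHead]
  | succ n ih =>
    intro v hv f cur acc hf
    obtain ⟨f, rfl⟩ : ∃ f', f = f' + 1 := ⟨f - 1, by omega⟩
    match v with
    | [] =>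
      simp [PySem.Chars.splitOn.go, PySem.Chars.splitOn, pvModHead]
    | c :: rest =>
      simp only [List.length_cons] at hv hf
      by_cases h : pvT.isPrefixOf (c :: rest)
      · -- separator matches here
        obtain ⟨t, ht⟩ := List.isPrefixOf_iff_prefix.mp h
        have hdrop : (c :: rest).drop pvT.length = t := by rw [← ht]; exact List.drop_left
        have hlt : t.length + 7 = rest.length + 1 := by
          have := congrArg List.length ht; simp [pvT] at this; omega
        have ih1 := ih t (by omega) f [] (cur.reverse :: acc) (by omega)
        have ih2 := ih t (by omega) ((c :: rest).length) [] ([[]]) (by simp only [List.length_cons]; omega)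
        have hspl : PySem.Chars.splitOn (c :: rest) pvT = [] :: pvModHead [] (PySem.Chars.splitOn t pvT) := by
          rw [PySem.Chars.splitOn]
          simp only [PySem.Chars.splitOn.go, h, if_pos]
          rw [hdrop]
          simpa using ih2
        rw [PySem.Chars.splitOn.go]
        simp only [h, if_pos, hdrop]
        rw [ih1, hspl]
        simp [pvModHead]
      · -- no separator at this position
        have ih1 := ih rest (by omega) f (c :: cur) acc (by omega)
        have ih2 := ih rest (by omega) ((c :: rest).length) [c] [] (by simp)
        have hspl : PySem.Chars.splitOn (c :: rest) pvT = pvModHead [c] (PySem.Chars.splitOn rest pvT) := by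
          rw [PySem.Chars.splitOn]
          simp only [PySem.Chars.splitOn.go, h]
          simpa using ih2
        rw [PySem.Chars.splitOn.go]
        simp only [h]
        rw [ih1, hspl]
        cases hS : PySem.Chars.splitOn rest pvT with
        | nil => simp [pvModHead]
        | cons hh tt => simp [pvModHead]

theorem pvSP_cons (c : Char) (rest : List Char) (h : ¬ pvT.isPrefixOf (c :: rest) = true) :
    PySem.Chars.splitOn (c :: rest) pvT = pvModHead [c] (PySem.Chars.splitOn rest pvT) := by
  rw [PySem.Chars.splitOn]
  simp only [PySem.Chars.splitOn.go, List.length_cons, h]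
  simpa using pvGO rest.length rest le_rfl (rest.length + 1) [c] [] (by omega)

theorem pvSP_ne_nil (v : List Char) : PySem.Chars.splitOn v pvT ≠ [] := by
  have h := pvGO v.length v le_rfl (v.length + 1) [] [] (by omega)
  intro hn
  have h2 : PySem.Chars.splitOn v pvT = pvModHead [] (PySem.Chars.splitOn v pvT) := by
    conv_lhs => rw [PySem.Chars.splitOn]
    simpa using h
  rw [hn] at h2
  simp [pvModHead] at h2

theorem pvModHead_nil (S : List (List Char)) (h : S ≠ []) : pvModHead [] S = S := by
  cases S with
  | nil => exact absurd rfl h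
  | cons a t => simp [pvModHead]

theorem pvSP_match (v : List Char) (h : pvT <+: v) :
    PySem.Chars.splitOn v pvT = [] :: PySem.Chars.splitOn (v.drop 7) pvT := by
  obtain ⟨t, ht⟩ := h
  have h7 : pvT.length = 7 := by decide
  have hdrop : v.drop 7 = t := by rw [← ht, ← h7]; exact List.drop_left
  rw [PySem.Chars.splitOn]
  have hpre : pvT.isPrefixOf v = true := List.isPrefixOf_iff_prefix.mpr ⟨t, ht⟩
  have hlen : v.length = t.length + 7 := by rw [← ht]; simp [pvT]
  match v, hlen with
  | c :: rest, hlen =>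
    simp only [PySem.Chars.splitOn.go, hpre, if_true, h7, hdrop]
    have := pvGO t.length t le_rfl ((c :: rest).length) [] [[]] (by simp only [List.length_cons] at hlen ⊢; omega)
    simp only [List.reverse_nil] at this ⊢
    rw [this, pvModHead_nil _ (pvSP_ne_nil t)]
    simp

theorem pvInfix_cons_of (l : List Char) (c : Char) (hi : pvT <:+: l) : pvT <:+: (c :: l) := by
  obtain ⟨p, q, hpq⟩ := hi
  exact ⟨c :: p, q, by simp [← hpq]⟩

-- a string without the separator splits to itself
theorem pvL1 (s : List Char) (h : ¬ pvT <:+: s) : PySem.Chars.splitOn s pvT = [s] := by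
  induction s with
  | nil => decide
  | cons c rest ih =>
    have hnp : ¬ pvT.isPrefixOf (c :: rest) = true := by
      intro hp
      exact h (List.IsPrefix.isInfix (List.isPrefixOf_iff_prefix.mp hp))
    rw [pvSP_cons c rest hnp, ih (fun hi => h (pvInfix_cons_of rest c hi))]
    simp [pvModHead]


-- "<trans>" has no nontrivial border
theorem pvNoBorder : ∀ k, k < 7 → 0 < k → pvT.drop k ≠ pvT.take (7 - k) := by decide

-- no occurrence of the separator can straddle the boundary of u ++ "<trans>" ++ v
theorem pvPFX (u v : List Char) (hu : ¬ pvT <:+: u) (hp : pvT <+: (u ++ pvT ++ v)) : u = [] := by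
  by_contra hne
  have hul : 0 < u.length := List.length_pos_of_ne_nil hne
  rcases Nat.lt_or_ge u.length 7 with hlt | hge
  · -- 0 < |u| < 7 : u would be a proper border of "<trans>"
    have h7 : pvT.length = 7 := by decide
    have htake := List.prefix_iff_eq_take.mp hp
    rw [h7, List.append_assoc, List.take_append, List.take_of_length_le (by omega), List.take_append_of_le_length (by simp [h7])] at htake
    have hdrop : pvT.drop u.length = pvT.take (7 - u.length) := by
      conv_lhs => rw [htake]
      exact List.drop_left
    exact pvNoBorder u.length hlt hul hdrop
  · -- |u| ≥ 7 : "<trans>" would be a prefix of u, hence an infix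
    have h7 : pvT.length = 7 := by decide
    have htake := List.prefix_iff_eq_take.mp hp
    rw [h7, List.append_assoc, List.take_append_of_le_length (by omega)] at htake
    exact hu (List.IsPrefix.isInfix (List.prefix_iff_eq_take.mpr (by rw [h7]; exact htake)))

-- splitting at the first separator occurrence
theorem pvL2 (u v : List Char) (hu : ¬ pvT <:+: u) :
    PySem.Chars.splitOn (u ++ pvT ++ v) pvT = u :: PySem.Chars.splitOn v pvT := by
  induction u with
  | nil =>
    have h := pvSP_match (pvT ++ v) ⟨v, rfl⟩
    have hd : (pvT ++ v).drop 7 = v := by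
      have : pvT.length = 7 := by decide
      rw [← this]; exact List.drop_left
    rw [hd] at h
    simpa using h
  | cons c u' ih =>
    have hnp : ¬ pvT.isPrefixOf ((c :: u') ++ pvT ++ v) = true := by
      intro hp
      exact (List.cons_ne_nil c u') (pvPFX (c :: u') v hu (List.isPrefixOf_iff_prefix.mp hp))
    have hcons : (c :: u') ++ pvT ++ v = c :: (u' ++ pvT ++ v) := by simp
    rw [hcons] at hnp ⊢
    rw [pvSP_cons c _ hnp, ih (fun hi => hu (pvInfix_cons_of u' c hi))]
    simp [pvModHead]

-- any string containing the separator decomposes at its first occurrence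
theorem pvDecomp (s : List Char) (h : pvT <:+: s) :
    ∃ u v, s = u ++ pvT ++ v ∧ ¬ pvT <:+: u := by
  have hf : (0 : Int) ≤ PySem.Chars.find s pvT := (PySem.Chars.find_nonneg_iff s pvT).mpr h
  obtain ⟨hpre, hmin⟩ := PySem.Chars.find_spec hf
  set j := (PySem.Chars.find s pvT).toNat with hj
  obtain ⟨w, hw⟩ := hpre
  refine ⟨s.take j, w, ?_, ?_⟩
  · conv_lhs => rw [← List.take_append_drop j s]
    rw [← hw]; simp
  · intro hi
    obtain ⟨p, q, hpq⟩ := hi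
    have hjlen : j ≤ s.length := by
      have := PySem.Chars.find_le_length s pvT
      omega
    have hlen : p.length + 7 + q.length = j := by
      have := congrArg List.length hpq
      simp [pvT, List.length_take] at this
      omega
    have : pvT <+: s.drop p.length := by
      have hs : s = p ++ (pvT ++ (q ++ s.drop j)) := by
        conv_lhs => rw [← List.take_append_drop j s]
        rw [← hpq]; simp
      rw [hs, List.drop_left]
      exact ⟨q ++ s.drop j, rfl⟩
    exact hmin p.length (by omega) this

-- the first piece of a split contains no separator
theorem pvL3 (s : List Char) : ¬ pvT <:+: ((PySem.Chars.splitOn s pvT).headD []) := by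
  by_cases h : pvT <:+: s
  · obtain ⟨u, v, rfl, hu⟩ := pvDecomp s h
    rw [pvL2 u v hu]; simpa using hu
  · rw [pvL1 s h]; simpa using h

-- the last piece of a split contains no separator
theorem pvL4 : ∀ (n : Nat) (s : List Char), s.length ≤ n → ¬ pvT <:+: ((PySem.Chars.splitOn s pvT).getLastD []) := by
  intro n
  induction n with
  | zero =>
    intro s hs
    have : s = [] := List.eq_nil_of_length_eq_zero (Nat.le_zero.mp hs)
    subst this; decide
  | succ n ih =>
    intro s hs
    by_cases h : pvT <:+: s
    · obtain ⟨u, v, rfl, hu⟩ := pvDecomp s h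
      rw [pvL2 u v hu]
      have h2 := ih v (by simp [pvT] at hs; omega)
      cases hv : PySem.Chars.splitOn v pvT with
      | nil => exact absurd hv (pvSP_ne_nil v)
      | cons a t =>
        rw [hv, List.getLastD_cons] at h2
        rw [List.getLastD_cons, List.getLastD_cons]
        exact h2
    · rw [pvL1 s h]; simpa using h

-- ==== String-level bridge ====
theorem pvSplit?_eq (s : String) :
    PySem.Str.split? s "<trans>" = some ((PySem.Chars.splitOn s.toList pvT).map String.ofList) := by
  simp [PySem.Str.split?, PySem.Chars.split?, pvT]

theorem pvPyGetD_zero {α : Type} (xs : List α) (d : α) : PySem.List.pyGetD xs 0 d = xs.headD d := by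
  have h := PySem.List.pyGetD_natCast xs 0 d
  simp at h
  rw [show (0 : Int) = ((0 : Nat) : Int) by simp] at h ⊢
  rw [PySem.List.pyGetD_natCast]
  cases xs <;> simp

theorem pvPyGetD_neg_one {α : Type} (xs : List α) (d : α) (h : xs ≠ []) :
    PySem.List.pyGetD xs (-1) d = xs.getLastD d := by
  have hn : 0 < xs.length := List.length_pos_of_ne_nil h
  rw [PySem.List.pyGetD, PySem.List.pyGet?, PySem.List.pyIdx?]
  rw [if_neg (by omega : ¬ (0:Int) ≤ -1), if_pos (by omega : -(xs.length : Int) ≤ -1)]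
  have h1 : ((xs.length - (-(-1 : Int)).toNat) : Nat) = xs.length - 1 := by simp
  rw [h1]
  simp only [Option.bind_some]
  rw [← List.getLast?_eq_getElem?]
  rw [List.getLastD_eq_getLast?]

theorem pvHeadPiece_toList (s : String) :
    (pvHeadPiece s).toList = (PySem.Chars.splitOn s.toList pvT).headD [] := by
  rw [pvHeadPiece, pvSplit?_eq]
  simp only [Option.getD_some]
  rw [pvPyGetD_zero]
  cases h : PySem.Chars.splitOn s.toList pvT with
  | nil => exact absurd h (pvSP_ne_nil _)
  | cons a t => simp

theorem pvLastPiece_toList (s : String) :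
    (pvLastPiece s).toList = (PySem.Chars.splitOn s.toList pvT).getLastD [] := by
  rw [pvLastPiece, pvSplit?_eq]
  simp only [Option.getD_some]
  rw [pvPyGetD_neg_one _ _ (by simp [pvSP_ne_nil])]
  cases h : PySem.Chars.splitOn s.toList pvT with
  | nil => exact absurd h (pvSP_ne_nil _)
  | cons a t =>
    rw [List.getLastD_eq_getLast?, List.getLastD_eq_getLast?, List.getLast?_map,
      List.getLast?_eq_some_getLast (l := a :: t) (by simp)]
    simp

-- the split of a merged string is exactly [first piece, last piece]
theorem pvSplit_merge (a b : String) :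
    PySem.Chars.splitOn (pvMergeA a b).toList pvT
      = [(pvHeadPiece a).toList, (pvLastPiece b).toList] := by
  have hm : (pvMergeA a b).toList = (pvHeadPiece a).toList ++ pvT ++ (pvLastPiece b).toList := by
    simp [pvMergeA, pvSplitA, pvHeadPiece, pvLastPiece, pvT]
  have hu : ¬ pvT <:+: (pvHeadPiece a).toList := by rw [pvHeadPiece_toList]; exact pvL3 a.toList
  have hw : ¬ pvT <:+: (pvLastPiece b).toList := by
    rw [pvLastPiece_toList]; exact pvL4 b.toList.length b.toList le_rfl
  rw [hm, pvL2 _ _ hu, pvL1 _ hw]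

theorem pvK1 (a b : String) : pvHeadPiece (pvMergeA a b) = pvHeadPiece a := by
  rw [← String.toList_inj, pvHeadPiece_toList, pvSplit_merge]
  simp

theorem pvFold (ts : List String) : ∀ (c : String), ts ≠ [] →
    ts.foldl pvMergeA c = pvHeadPiece c ++ "<trans>" ++ pvLastPiece (ts.getLastD "") := by
  induction ts with
  | nil => intro c h; exact absurd rfl h
  | cons t r ih =>
    intro c _
    cases r with
    | nil => simp [pvMergeA, pvSplitA, pvHeadPiece, pvLastPiece]
    | cons t2 r2 =>
      rw [List.foldl_cons, ih (pvMergeA c t) (by simp), pvK1, List.getLastD_cons, List.getLastD_cons,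
        List.getLastD_cons]

theorem pvMergeRun_eq (x : String) (tw : List String) :
    pvMergeRun (x :: tw) = tw.foldl pvMergeA x := by
  cases tw with
  | nil => rfl
  | cons y r =>
    rw [pvFold (y :: r) x (by simp), pvMergeRun, List.getLastD_cons]

-- ==== structural layer: A's accumulator loop vs the run recursion ====
def pvFin (p : List String × Option String) : List String :=
  match p.2 with
  | some c => p.1 ++ [c]
  | none => p.1

def pvF (cur : Option String) (l : List String) : List String :=
  pvFin (l.foldl pvStepA ([], cur))

theorem pvFoldAcc (l : List String) : ∀ (acc : List String) (cur : Option String),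
    l.foldl pvStepA (acc, cur)
      = (acc ++ (l.foldl pvStepA ([], cur)).1, (l.foldl pvStepA ([], cur)).2) := by
  induction l with
  | nil => intro acc cur; simp
  | cons x xs ih =>
    intro acc cur
    rw [List.foldl_cons, List.foldl_cons]
    by_cases h : PySem.Str.isIn "<trans>" x
    · cases cur with
      | none => simp only [pvStepA, h, if_pos]; exact ih acc (some x)
      | some c => simp only [pvStepA, h, if_pos]; exact ih acc (some (pvMergeA c x))
    · cases cur with
      | none =>
        simp only [pvStepA, h, Bool.false_eq_true, if_false]
        rw [ih (acc ++ [x]) none, ih ([] ++ [x]) none]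
        simp
      | some c =>
        simp only [pvStepA, h, Bool.false_eq_true, if_false]
        rw [ih (acc ++ [c] ++ [x]) none, ih ([] ++ [c] ++ [x]) none]
        simp

theorem pvFin_append (a : List String) (p : List String × Option String) :
    pvFin (a ++ p.1, p.2) = a ++ pvFin p := by
  cases p with
  | mk m c => cases c <;> simp [pvFin]

theorem pvF_cons_trans_none (x : String) (xs : List String) (h : pvIsTrans x = true) :
    pvF none (x :: xs) = pvF (some x) xs := by
  simp only [pvF, List.foldl_cons, pvStepA, pvIsTrans] at h ⊢
  rw [h]
  simp

theorem pvF_cons_trans_some (c x : String) (xs : List String) (h : pvIsTrans x = true) :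
    pvF (some c) (x :: xs) = pvF (some (pvMergeA c x)) xs := by
  simp only [pvF, List.foldl_cons, pvStepA, pvIsTrans] at h ⊢
  rw [h]
  simp

theorem pvF_cons_nt_none (x : String) (xs : List String) (h : pvIsTrans x = false) :
    pvF none (x :: xs) = x :: pvF none xs := by
  simp only [pvF, List.foldl_cons, pvStepA, pvIsTrans] at h ⊢
  rw [h]
  simp only [Bool.false_eq_true, if_false]
  rw [pvFoldAcc xs ([] ++ [x]) none]
  simpa using pvFin_append [x] (xs.foldl pvStepA ([], none))

theorem pvF_cons_nt_some (c x : String) (xs : List String) (h : pvIsTrans x = false) :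
    pvF (some c) (x :: xs) = c :: x :: pvF none xs := by
  simp only [pvF, List.foldl_cons, pvStepA, pvIsTrans] at h ⊢
  rw [h]
  simp only [Bool.false_eq_true, if_false]
  rw [pvFoldAcc xs ([] ++ [c] ++ [x]) none]
  simpa using pvFin_append [c, x] (xs.foldl pvStepA ([], none))

theorem pvRunRecSplit (xs : List String) :
    pvRunRec xs
      = xs.takeWhile (fun s => !pvIsTrans s) ++ pvRunRec (xs.dropWhile (fun s => !pvIsTrans s)) := by
  cases xs with
  | nil => simp [pvRunRec]
  | cons y ys =>
    by_cases h : pvIsTrans y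
    · simp [h]
    · rw [pvRunRec]
      simp [h]

theorem pvRunRecCons_nt (x : String) (xs : List String) (h : pvIsTrans x = false) :
    pvRunRec (x :: xs) = x :: pvRunRec xs := by
  rw [pvRunRec]
  simp only [h, Bool.false_eq_true, if_false]
  simp only [List.cons_append]
  rw [← pvRunRecSplit xs]

theorem pvG : ∀ (n : Nat) (l : List String), l.length ≤ n →
    (pvF none l = pvRunRec l) ∧
    (∀ c, pvF (some c) l
        = (l.takeWhile pvIsTrans).foldl pvMergeA c :: pvRunRec (l.dropWhile pvIsTrans)) := by
  intro n
  induction n with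
  | zero =>
    intro l hl
    have : l = [] := List.eq_nil_of_length_eq_zero (Nat.le_zero.mp hl)
    subst this
    exact ⟨by simp [pvF, pvFin, pvRunRec], fun c => by simp [pvF, pvFin, pvRunRec]⟩
  | succ n ih =>
    intro l hl
    cases l with
    | nil => exact ⟨by simp [pvF, pvFin, pvRunRec], fun c => by simp [pvF, pvFin, pvRunRec]⟩
    | cons x xs =>
      simp only [List.length_cons] at hl
      have ihxs := ih xs (by omega)
      constructor
      · by_cases h : pvIsTrans x
        · rw [pvF_cons_trans_none x xs h, ihxs.2 x, pvRunRec]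
          simp only [h, if_true]
          rw [pvMergeRun_eq]
        · rw [pvF_cons_nt_none x xs (by simpa using h), ihxs.1, pvRunRecCons_nt x xs (by simpa using h)]
      · intro c
        by_cases h : pvIsTrans x
        · rw [pvF_cons_trans_some c x xs h, ihxs.2 (pvMergeA c x)]
          simp [h]
        · rw [pvF_cons_nt_some c x xs (by simpa using h), ihxs.1,
            ← pvRunRecCons_nt x xs (by simpa using h)]
          simp [h]

-- ==== B's two-pass port vs the run recursion ====

-- pvLastRun prepends one entry per element
theorem pvLastRun_tail (x : String) (xs : List String) :
    (pvLastRun (x :: xs)).tail = pvLastRun xs := by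
  cases xs with
  | nil => rfl
  | cons y ys => rfl

theorem pvLastRun_drop : ∀ (t rest : List String),
    (pvLastRun (t ++ rest)).drop t.length = pvLastRun rest := by
  intro t
  induction t with
  | nil => intro rest; simp
  | cons x t' ih =>
    intro rest
    have h1 : (x :: t') ++ rest = x :: (t' ++ rest) := rfl
    rw [h1, List.length_cons]
    have h2 : (pvLastRun (x :: (t' ++ rest))).drop (t'.length + 1)
        = ((pvLastRun (x :: (t' ++ rest))).drop 1).drop t'.length := by
      rw [List.drop_drop, Nat.add_comm]
    rw [h2, List.drop_one, pvLastRun_tail, ih]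

-- head of pvLastRun over a nonempty all-trans run followed by a non-trans (or no) item
theorem pvLastRun_head : ∀ (t : List String), t ≠ [] → (∀ x ∈ t, pvIsTrans x = true) →
    ∀ rest : List String, (∀ h ∈ rest.head?, pvIsTrans h = false) →
    (pvLastRun (t ++ rest)).headD "" = t.getLastD "" := by
  intro t
  induction t with
  | nil => intro h; exact absurd rfl h
  | cons x t' ih =>
    intro _ hall rest hrest
    cases t' with
    | nil =>
      cases rest with
      | nil => simp [pvLastRun]
      | cons h hs =>
        have hh : pvIsTrans h = false := hrest h (by simp)
        simp [pvLastRun, hh]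
    | cons y t2 =>
      have hy : pvIsTrans y = true := hall y (by simp)
      have hx : pvIsTrans x = true := hall x (by simp)
      have hrec := ih (by simp) (fun z hz => hall z (by simp [hz])) rest hrest
      have hne : pvLastRun ((y :: t2) ++ rest) ≠ [] := by
        cases t2 <;> cases rest <;> simp [pvLastRun]
      simp only [List.cons_append] at hrec hne ⊢
      rw [pvLastRun]
      simp only [hx, hy, Bool.and_self, if_true, List.headD_cons]
      cases hc : pvLastRun (y :: (t2 ++ rest)) with
      | nil => exact absurd hc hne
      | cons a as =>
        rw [hc] at hrec
        simp only [List.headD_cons] at hrec ⊢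
        simp only [List.getLastD_cons] at hrec ⊢
        exact hrec

-- emission: a non-trans head passes through, whatever prev is
theorem pvEmit_nt (prev : Bool) (x : String) (rest lrs : List String) (h : pvIsTrans x = false) :
    pvEmit prev (x :: rest) lrs = x :: pvEmit false rest lrs.tail := by
  cases rest with
  | nil => simp [pvEmit, h]
  | cons y ys => simp [pvEmit, h]

-- emission: inside a run (prev = true) trans items emit nothing
theorem pvEmit_skip : ∀ (t : List String), (∀ x ∈ t, pvIsTrans x = true) →
    ∀ rest lrs, pvEmit true (t ++ rest) lrs = pvEmit true rest (lrs.drop t.length) := by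
  intro t
  induction t with
  | nil => intro _ rest lrs; simp
  | cons x t' ih =>
    intro hall rest lrs
    have hx : pvIsTrans x = true := hall x (by simp)
    have hrec := ih (fun z hz => hall z (by simp [hz])) rest lrs.tail
    rw [show (x :: t') ++ rest = x :: (t' ++ rest) from rfl]
    cases hc : t' ++ rest with
    | nil =>
      have ht' : t' = [] := by cases t' <;> simp_all
      have hr : rest = [] := by cases rest <;> simp_all
      subst ht'; subst hr
      simp [pvEmit, hx]
    | cons z zs =>
      simp only [pvEmit, hx]
      simp only [show (true = false) = False by simp, if_false, if_true, List.nil_append]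
      rw [← hc, hrec]
      have h2 : lrs.tail.drop t'.length = lrs.drop (t'.length + 1) := by
        rw [← List.drop_one, List.drop_drop, Nat.add_comm]
      rw [h2]
      simp

-- emission: prev is irrelevant when the next item is non-trans (or there is none)
theorem pvEmit_prev (r L : List String) (hr : ∀ h ∈ r.head?, pvIsTrans h = false) :
    pvEmit true r L = pvEmit false r L := by
  cases r with
  | nil => rfl
  | cons h hs =>
    have hh : pvIsTrans h = false := hr h (by simp)
    rw [pvEmit_nt true h hs L hh, pvEmit_nt false h hs L hh]

theorem pvDropWhile_head {α : Type} (p : α → Bool) (l : List α) :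
    ∀ h ∈ (l.dropWhile p).head?, p h = false := by
  induction l with
  | nil => intro h hh; simp at hh
  | cons a l' ih =>
    intro h hh
    by_cases hp : p a
    · rw [List.dropWhile_cons_of_pos hp] at hh; exact ih h hh
    · rw [List.dropWhile_cons_of_neg hp] at hh
      simp at hh; subst hh; simpa using hp

-- emission: a run start followed by another trans item emits the closed-form merge
theorem pvEmit_start (x y : String) (zs lrs : List String)
    (hx : pvIsTrans x = true) (hy : pvIsTrans y = true) :
    pvEmit false (x :: y :: zs) lrs
      = (pvHeadPiece x ++ "<trans>" ++ pvLastPiece (lrs.tail.headD ""))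
        :: pvEmit true (y :: zs) lrs.tail := by
  simp [pvEmit, hx, hy]

-- emission: a singleton run start (next item non-trans) emits the item verbatim
theorem pvEmit_start_nt (x y : String) (zs lrs : List String)
    (hx : pvIsTrans x = true) (hy : pvIsTrans y = false) :
    pvEmit false (x :: y :: zs) lrs = x :: pvEmit true (y :: zs) lrs.tail := by
  simp [pvEmit, hx, hy]

-- main bridge: the emission pass equals the run recursion
theorem pvB : ∀ (n : Nat) (l : List String), l.length ≤ n →
    pvEmit false l (pvLastRun l) = pvRunRec l := by
  intro n
  induction n with
  | zero =>
    intro l hl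
    have : l = [] := List.eq_nil_of_length_eq_zero (Nat.le_zero.mp hl)
    subst this
    simp [pvEmit, pvRunRec]
  | succ n ih =>
    intro l hl
    cases l with
    | nil => simp [pvEmit, pvRunRec]
    | cons x xs =>
      simp only [List.length_cons] at hl
      by_cases hx : pvIsTrans x = true
      · cases ht : xs.takeWhile pvIsTrans with
        | nil =>
          cases xs with
          | nil => simp [pvEmit, pvRunRec, pvMergeRun, hx]
          | cons y ys =>
            have hy : pvIsTrans y = false := by
              by_cases h : pvIsTrans y = true
              · rw [List.takeWhile_cons_of_pos h] at ht; cases ht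
              · simpa using h
            have hd : (y :: ys).dropWhile pvIsTrans = y :: ys :=
              List.dropWhile_cons_of_neg (by simp [hy])
            rw [pvRunRec]
            simp only [hx, if_true, ht, hd]
            rw [pvEmit_start_nt x y ys _ hx hy, pvLastRun_tail,
              pvEmit_prev _ _ (by intro h hh; simp at hh; subst hh; exact hy),
              ih (y :: ys) (by simpa using Nat.le_of_succ_le_succ hl)]
            simp [pvMergeRun]
        | cons y t2 =>
          have hy : pvIsTrans y = true := by
            have hm : y ∈ xs.takeWhile pvIsTrans := by rw [ht]; simp
            exact List.mem_takeWhile_imp hm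
          have hallt : ∀ z ∈ y :: t2, pvIsTrans z = true := by
            intro z hz
            have hm : z ∈ xs.takeWhile pvIsTrans := by rw [ht]; exact hz
            exact List.mem_takeWhile_imp hm
          have hrhead : ∀ h ∈ (xs.dropWhile pvIsTrans).head?, pvIsTrans h = false :=
            pvDropWhile_head _ _
          have hxs : xs = (y :: t2) ++ xs.dropWhile pvIsTrans := by
            conv_lhs => rw [← List.takeWhile_append_dropWhile (p := pvIsTrans) (l := xs)]
            rw [ht]
          have hrlen : (xs.dropWhile pvIsTrans).length ≤ n := by
            have := List.length_dropWhile_le pvIsTrans xs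
            omega
          rw [pvRunRec]
          simp only [hx, if_true, ht]
          conv_lhs => rw [hxs]
          simp only [List.cons_append]
          rw [pvEmit_start x y (t2 ++ xs.dropWhile pvIsTrans) _ hx hy, pvLastRun_tail,
            show y :: (t2 ++ xs.dropWhile pvIsTrans) = (y :: t2) ++ xs.dropWhile pvIsTrans from rfl,
            pvEmit_skip (y :: t2) hallt, pvLastRun_drop,
            pvEmit_prev _ _ hrhead, ih (xs.dropWhile pvIsTrans) hrlen,
            pvLastRun_head (y :: t2) (by simp) hallt _ hrhead]
          simp [pvMergeRun]
      · have hx' : pvIsTrans x = false := by simpa using hx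
        rw [pvEmit_nt false x xs _ hx', pvLastRun_tail, ih xs (Nat.le_of_succ_le_succ hl),
          pvRunRecCons_nt x xs hx']

-- ===== VERDICT (by name: the statement is the Claim_ definition above) =====
theorem extract_phoneme_states_spec : Claim_equal_extract_phoneme_states := by
  intro l _
  unfold Spec_extract_phoneme_states
  have h : extract_phoneme_states l = pvF none l := by
    cases hp : l.foldl pvStepA ([], none) with
    | mk m c => cases c <;> simp [extract_phoneme_states, pvF, pvFin, hp]
  rw [h, (pvG l.length l le_rfl).1, extract_phoneme_states_alt, pvB l.length l le_rfl]
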